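-- pv_equiv track=rewrite | github.com/nextprocurement/RAG_tool | src/utils/utils.py | reorder_acronyms
-- ===== SOURCE A (Python) =====
-- def reorder_acronyms(acronyms_dict):
--     acronyms = list(acronyms_dict.keys())
--     expansions = list(acronyms_dict.values())
--     assigned_expansions = [None] * len(acronyms)
--
--     # Try matching with initial letter
--     for i, acronym in enumerate(acronyms):
--         for j, expansion in enumerate(expansions):
--             if assigned_expansions[j] is None and expansion.lower().startswith(acronym[0].lower()):
--                 assigned_expansions[j] = acronym
--                 break
--
--     # Matching for the highest number of initial letters
--     for i, acronym in enumerate(acronyms):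
--         if acronym not in assigned_expansions:
--             max_match = -1
--             best_index = -1
--             for j, expansion in enumerate(expansions):
--                 if assigned_expansions[j] is None:
--                     matches = sum(1 for a, b in zip(acronym.lower(), expansion.lower()) if a == b)
--                     if matches > max_match:
--                         max_match = matches
--                         best_index = j
--             if best_index != -1:
--                 assigned_expansions[best_index] = acronym
--
--     # Sorted dict
--     corrected_dict = {assigned_expansions[i]: expansions[i] for i in range(len(acronyms)) if assigned_expansions[i] is not None}
--     return corrected_dict
-- ===== SOURCE B (Python) =====
-- def reorder_acronyms(acronyms_dict):
--     expansions = list(acronyms_dict.values())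
--     n = len(expansions)
--
--     # Bucket the expansion indices by the lowercased first character of the
--     # expansion; each bucket keeps its indices in ascending order.
--     buckets = {}
--     for j, expansion in enumerate(expansions):
--         buckets.setdefault(expansion.lower()[:1], []).append(j)
--
--     assigned = [None] * n
--     used = set()
--
--     # Phase 1: pop the first still-free expansion index from the acronym's bucket.
--     for acronym in acronyms_dict:
--         bucket = buckets.get(acronym[0].lower())
--         if bucket:
--             assigned[bucket.pop(0)] = acronym
--             used.add(acronym)
--
--     # Phase 2: among the remaining free expansions, pick the one whose lowered
--     # text agrees with the lowered acronym on the most positions (first wins ties).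
--     remaining = [j for j in range(n) if assigned[j] is None]
--     for acronym in acronyms_dict:
--         if acronym not in used and remaining:
--             low = acronym.lower()
--             best = max(remaining,
--                        key=lambda j: sum(a == b for a, b in zip(low, expansions[j].lower())))
--             assigned[best] = acronym
--             used.add(acronym)
--             remaining.remove(best)
--
--     return {assigned[j]: expansions[j] for j in range(n) if assigned[j] is not None}
-- ===== Notes on version B (the rewrite author's own statement) =====
-- stated objective: faster
-- what changed: Phase 1's inner scan over all expansions per acronym is replaced by a precomputed bucket (first-lowered-character -> queue of expansion indices) popped from the front, and phase 2's full accumulator scan with an is-None test is replaced by max() with a key over a maintained list of the still-free indices, with a 'used' set replacing A's 'acronym not in assigned_expansions' list scan.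
-- outside the precondition, e.g. on reorder_acronyms({'': 'x'}): A raises IndexError, B raises IndexError
import Mathlib
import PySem

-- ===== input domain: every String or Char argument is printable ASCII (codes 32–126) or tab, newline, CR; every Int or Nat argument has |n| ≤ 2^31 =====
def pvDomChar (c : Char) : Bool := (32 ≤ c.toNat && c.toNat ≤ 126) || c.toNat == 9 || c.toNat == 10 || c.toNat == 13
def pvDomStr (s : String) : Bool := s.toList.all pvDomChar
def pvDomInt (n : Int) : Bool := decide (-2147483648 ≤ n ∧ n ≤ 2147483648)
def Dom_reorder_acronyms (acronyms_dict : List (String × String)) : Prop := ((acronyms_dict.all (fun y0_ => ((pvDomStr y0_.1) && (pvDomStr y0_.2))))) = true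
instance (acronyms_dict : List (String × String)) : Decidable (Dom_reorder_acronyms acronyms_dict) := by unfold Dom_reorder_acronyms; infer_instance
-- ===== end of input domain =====

-- B replaces A's quadratic phase-1 scan by per-first-letter buckets of expansion indices and
-- A's phase-2 accumulator scan over all expansions by max() over a shrinking list of the still-free
-- indices (objective: faster). Same return value on every input admitted by Pre_.

-- ===== PORT A =====
-- acronym[0].lower() as a character list (none = IndexError on an empty acronym, excluded
-- by Pre_; the total port returns [] there).
def pvFirstLower (ac : String) : List Char :=
  match PySem.Str.pyGet? ac 0 with
  | some c => PySem.Chars.lower [c]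
  | none => []

-- sum(1 for a, b in zip(la, lb) if a == b)  (both Pythons compute this same expression)
def pvMatches (la lb : List Char) : Int :=
  (la.zip lb).foldl (fun s p => if p.1 = p.2 then s + 1 else s) 0

-- the closing dict comprehension {assigned[i]: expansions[i] for i in range(n) if assigned[i] is not None}
-- (textually the same line in A and in B)
def pvFinal (exps : List String) (asg : List (Option String)) : List (String × String) :=
  ((List.range exps.length).foldl
    (fun (d : PySem.Dict String String) i =>
      match asg[i]? with
      | some (some a) => d.insert a (exps[i]?.getD "")
      | _ => d) PySem.Dict.empty).items

-- A, phase-1 inner loop: the first free expansion whose lowered text starts with the lowered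
-- first letter of `ac` receives `ac`; break.
def pvScanA (ac : String) : List String → List (Option String) → List (Option String)
  | _, [] => []
  | [], asg => asg
  | e :: es, o :: os =>
    if o = none ∧ PySem.Chars.startswith (PySem.Chars.lower e.toList) (pvFirstLower ac) = true then
      some ac :: os
    else o :: pvScanA ac es os

-- A, phase-2 body for one acronym: running (max_match, best_index) accumulator over all indices.
def pvStepA2 (exps : List String) (asg : List (Option String)) (ac : String) : List (Option String) :=
  if some ac ∈ asg then asg
  else
    let st := (List.range exps.length).foldl
      (fun (st : Int × Int) (j : Nat) =>
        if asg[j]? = some none then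
          let m := pvMatches (PySem.Chars.lower ac.toList)
                             (PySem.Chars.lower ((exps[j]?.getD "").toList))
          if st.1 < m then (m, (j : Int)) else st
        else st) (-1, -1)
    if st.2 ≠ -1 then asg.set st.2.toNat (some ac) else asg

def reorder_acronyms (acronyms_dict : List (String × String)) : List (String × String) :=
  let acronyms := acronyms_dict.map Prod.fst   -- list(d.keys()); Pre_: the keys are distinct
  let exps := acronyms_dict.map Prod.snd       -- list(d.values())
  let asg1 := acronyms.foldl (fun asg ac => pvScanA ac exps asg)
      (List.replicate exps.length (none : Option String))
  let asg2 := acronyms.foldl (pvStepA2 exps) asg1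
  pvFinal exps asg2

-- ===== PORT B =====
-- expansion.lower()[:1]
def pvKeyOf (e : String) : List Char :=
  PySem.Chars.slice (PySem.Chars.lower e.toList) none (some 1)

-- buckets.setdefault(expansion.lower()[:1], []).append(j)   (indices j ≥ 0, kept as Nat)
def pvBuckets (exps : List String) : PySem.Dict (List Char) (List Nat) :=
  exps.zipIdx.foldl (fun d p => d.modify (pvKeyOf p.1) [] (fun b => b ++ [p.2])) PySem.Dict.empty

-- B, phase-1 step: pop the front index of the acronym's bucket, if the bucket is non-empty.
def pvStepB1 (st : PySem.Dict (List Char) (List Nat) × List (Option String) × PySem.Set String)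
    (ac : String) : PySem.Dict (List Char) (List Nat) × List (Option String) × PySem.Set String :=
  match st, pvStepB1.get st ac with
  | (bk, asg, used), some (j :: rest) =>
      (bk.insert (pvFirstLower ac) rest, asg.set j (some ac), PySem.Set.add used ac)
  | _, _ => st
where get (st : PySem.Dict (List Char) (List Nat) × List (Option String) × PySem.Set String)
    (ac : String) : Option (List Nat) := st.1.get? (pvFirstLower ac)

-- B, phase-2 step: max(remaining, key=score) — the FIRST best-scoring free index — via PySem.List.max?.
-- remaining.remove(best) is List.erase (best ∈ remaining, so no ValueError is reachable).
def pvStepB2 (exps : List String)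
    (st : List (Option String) × PySem.Set String × List Nat) (ac : String) :
    List (Option String) × PySem.Set String × List Nat :=
  match st with
  | (asg, used, rem) =>
    if PySem.Set.contains used ac = false ∧ rem ≠ [] then
      match PySem.List.max? rem (fun j =>
          pvMatches (PySem.Chars.lower ac.toList)
                    (PySem.Chars.lower ((exps[j]?.getD "").toList))) with
      | some best => (asg.set best (some ac), PySem.Set.add used ac, rem.erase best)
      | none => (asg, used, rem)
    else (asg, used, rem)

def reorder_acronyms_alt (acronyms_dict : List (String × String)) : List (String × String) :=
  let acronyms := acronyms_dict.map Prod.fst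
  let exps := acronyms_dict.map Prod.snd
  let s1 := acronyms.foldl pvStepB1
      (pvBuckets exps, List.replicate exps.length (none : Option String), PySem.Set.empty)
  let rem0 := (List.range exps.length).filter (fun j => decide (s1.2.1[j]? = some none))
  let s2 := acronyms.foldl (pvStepB2 exps) (s1.2.1, s1.2.2, rem0)
  pvFinal exps s2.1

-- ===== PRECONDITION & SPEC =====
-- The argument is a Python dict: a pair list with duplicate first components does not represent
-- one (Python collapses duplicates before A ever runs), so Pre_ excludes it; and an empty-string
-- key makes A raise IndexError at acronym[0], so Pre_ excludes that too.
def Pre_reorder_acronyms (acronyms_dict : List (String × String)) : Prop :=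
  (acronyms_dict.map Prod.fst).Nodup ∧ ∀ p ∈ acronyms_dict, p.1 ≠ ""
instance (acronyms_dict : List (String × String)) : Decidable (Pre_reorder_acronyms acronyms_dict) := by
  unfold Pre_reorder_acronyms; infer_instance

def pvWitness_reorder_acronyms : (List (String × String)) :=
  [("NASA", "National Aeronautics"), ("EU", "European Union"), ("WHO", "Health Organization")]

def Spec_reorder_acronyms (acronyms_dict : List (String × String)) (out : List (String × String)) : Prop := out = reorder_acronyms_alt acronyms_dict
instance (acronyms_dict : List (String × String)) (out : List (String × String)) : Decidable (Spec_reorder_acronyms acronyms_dict out) := by unfold Spec_reorder_acronyms; infer_instance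

-- ===== CLAIM (what is proved, stated in full; the proofs are below) =====
def Claim_equal_reorder_acronyms : Prop := ∀ (acronyms_dict : List (String × String)), Dom_reorder_acronyms acronyms_dict → Pre_reorder_acronyms acronyms_dict → Spec_reorder_acronyms acronyms_dict (reorder_acronyms acronyms_dict)

-- ===== LEMMAS AND PROOFS =====

-- ghost: the still-free expansion indices whose key is c, in ascending order
def pvFree (es : List String) (asg : List (Option String)) (c : List Char) : List Nat :=
  match es, asg with
  | e :: es', o :: os =>
      (if o = none ∧ pvKeyOf e = c then [0] else []) ++ (pvFree es' os c).map (· + 1)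
  | _, _ => []

-- ghost: all still-free expansion indices, ascending
def pvRem (asg : List (Option String)) : List Nat :=
  (List.range asg.length).filter (fun j => decide (asg[j]? = some none))

lemma pvMatches_nonneg (la lb : List Char) : 0 ≤ pvMatches la lb := by
  unfold pvMatches
  rw [PySem.List.foldl_ite_add_one (fun p : Char × Char => p.1 = p.2)]
  positivity

lemma pvFirstLower_cons {ac : String} {c : Char} {t : List Char} (h : ac.toList = c :: t) :
    pvFirstLower ac = [PySem.Chars.lowerChar c] := by
  simp [pvFirstLower, PySem.Str.pyGet?, PySem.Chars.pyGet?_eq_listPyGet?, h,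
    PySem.List.pyGet?, PySem.List.pyIdx?, PySem.Chars.lower]

lemma pvCond_iff {ac : String} {c : Char} {t : List Char} (h : ac.toList = c :: t) (e : String) :
    (PySem.Chars.startswith (PySem.Chars.lower e.toList) (pvFirstLower ac) = true)
      ↔ pvKeyOf e = pvFirstLower ac := by
  rw [pvFirstLower_cons h]
  unfold pvKeyOf
  rw [PySem.Chars.slice_eq_listSlice, PySem.List.slice_to _ (by norm_num)]
  rw [PySem.Chars.startswith_iff]
  cases hl : PySem.Chars.lower e.toList with
  | nil => simp
  | cons x xs => simp [List.cons_prefix_cons, eq_comm]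

lemma pvScanA_eq {ac : String} {c : Char} {t : List Char} (h : ac.toList = c :: t) :
    ∀ (es : List String) (asg : List (Option String)),
    pvScanA ac es asg =
      match (pvFree es asg (pvFirstLower ac)).head? with
      | some j => asg.set j (some ac)
      | none => asg := by
  intro es
  induction es with
  | nil => intro asg; cases asg <;> simp [pvScanA, pvFree]
  | cons e es' ih =>
    intro asg
    cases asg with
    | nil => simp [pvScanA, pvFree]
    | cons o os =>
      by_cases hc : o = none ∧
          PySem.Chars.startswith (PySem.Chars.lower e.toList) (pvFirstLower ac) = true
      · have hk : pvKeyOf e = pvFirstLower ac := (pvCond_iff h e).mp hc.2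
        simp [pvScanA, hc, pvFree, hk]
      · have hk : ¬ (o = none ∧ pvKeyOf e = pvFirstLower ac) := by
          rintro ⟨h1, h2⟩; exact hc ⟨h1, (pvCond_iff h e).mpr h2⟩
        rw [pvScanA, if_neg hc]
        simp only [pvFree, if_neg hk, List.nil_append]
        rw [ih os]
        cases hfr : pvFree es' os (pvFirstLower ac) with
        | nil => simp
        | cons j r => simp [List.set]

lemma pvFree_mem {es : List String} {asg : List (Option String)} {c : List Char} {j : Nat}
    (h : j ∈ pvFree es asg c) : asg[j]? = some none := by
  induction es generalizing asg j with
  | nil => simp [pvFree] at h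
  | cons e es' ih =>
    cases asg with
    | nil => simp [pvFree] at h
    | cons o os =>
      simp only [pvFree, List.mem_append] at h
      rcases h with h | h
      · by_cases hP : o = none ∧ pvKeyOf e = c
        · rw [if_pos hP] at h; simp at h; subst h; simp [hP.1]
        · rw [if_neg hP] at h; simp at h
      · obtain ⟨j', hj', rfl⟩ := List.mem_map.mp h
        simpa using ih hj'

lemma pvFree_set_head {es : List String} {k : List Char} {ac : String} :
    ∀ {asg : List (Option String)} {j : Nat} {rest : List Nat},
    pvFree es asg k = j :: rest →
    ∀ c, pvFree es (asg.set j (some ac)) c = if c = k then rest else pvFree es asg c := by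
  induction es with
  | nil => intro asg j rest h; simp [pvFree] at h
  | cons e es' ih =>
    intro asg j rest h c
    cases asg with
    | nil => simp [pvFree] at h
    | cons o os =>
      by_cases hP : o = none ∧ pvKeyOf e = k
      · simp only [pvFree, if_pos hP, List.cons_append, List.nil_append, List.cons.injEq] at h
        obtain ⟨rfl, rfl⟩ := h
        simp only [List.set]
        by_cases hck : c = k
        · subst hck; simp [pvFree, hP.2]
        · have hno : ¬ (o = none ∧ pvKeyOf e = c) := by
            rintro ⟨_, h2⟩; exact hck (by rw [← h2, hP.2])
          simp only [pvFree, if_neg hck, if_neg hno]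
          have hno2 : ¬ ((some ac : Option String) = none ∧ pvKeyOf e = c) := by
            rintro ⟨h1, _⟩; simp at h1
          rw [if_neg hno2]
      · simp only [pvFree, if_neg hP, List.nil_append] at h
        cases hfr : pvFree es' os k with
        | nil => rw [hfr] at h; simp at h
        | cons j' r' =>
          rw [hfr] at h
          simp only [List.map_cons, List.cons.injEq] at h
          obtain ⟨rfl, hrest⟩ := h
          simp only [List.set, pvFree]
          have hrec := ih hfr c
          rw [hrec]
          by_cases hck : c = k
          · subst hck
            rw [if_pos rfl, if_pos rfl] at *
            rw [if_neg hP, ← hrest]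
            simp
          · rw [if_neg hck, if_neg hck]

lemma pvMem_set_none {asg : List (Option String)} {j : Nat} (h : asg[j]? = some none)
    (a ac : String) : some a ∈ asg.set j (some ac) ↔ a = ac ∨ some a ∈ asg := by
  have hj : j < asg.length := by
    by_contra hlt
    rw [List.getElem?_eq_none (by omega)] at h
    simp at h
  constructor
  · intro hm
    obtain ⟨i, hi⟩ := List.mem_iff_getElem?.mp hm
    rw [List.getElem?_set] at hi
    by_cases hij : j = i
    · subst hij; rw [if_pos rfl, if_pos hj] at hi; left
      exact (Option.some.inj (Option.some.inj hi)).symm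
    · rw [if_neg hij] at hi; right; exact List.mem_iff_getElem?.mpr ⟨i, hi⟩
  · rintro (rfl | hm)
    · exact List.mem_iff_getElem?.mpr ⟨j, by rw [List.getElem?_set, if_pos rfl, if_pos hj]⟩
    · obtain ⟨i, hi⟩ := List.mem_iff_getElem?.mp hm
      have hij : j ≠ i := by rintro rfl; rw [h] at hi; simp at hi
      exact List.mem_iff_getElem?.mpr ⟨i, by rw [List.getElem?_set, if_neg hij]; exact hi⟩

lemma pvBuckets_spec (exps : List String) (c : List Char) :
    (pvBuckets exps).getD c [] = pvFree exps (List.replicate exps.length none) c := by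
  have auxz : ∀ (es : List String) (k : Nat),
      (((es.zipIdx k).map (fun p => (pvKeyOf p.1, p.2))).filter (fun q => q.1 == c)).map (·.2)
        = (pvFree es (List.replicate es.length none) c).map (· + k) := by
    intro es
    induction es with
    | nil => intro k; simp [pvFree]
    | cons e es' ih =>
      intro k
      rw [List.zipIdx_cons]
      have hrep : List.replicate (e :: es').length (none : Option String)
          = none :: List.replicate es'.length none := by simp [List.replicate_succ]
      rw [hrep]
      simp only [pvFree, List.map_cons]
      by_cases hk : pvKeyOf e = c
      · rw [List.filter_cons_of_pos (by simpa using hk),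
          if_pos (show True ∧ pvKeyOf e = c from ⟨trivial, hk⟩)]
        simp only [List.map_cons, List.cons_append, List.nil_append]
        rw [ih (k + 1), List.map_map]
        congr 1
        · omega
        · apply List.map_congr_left
          intro x _
          simp only [Function.comp_apply]
          omega
      · rw [List.filter_cons_of_neg (by simpa using hk),
          if_neg (show ¬ (True ∧ pvKeyOf e = c) from fun h => hk h.2)]
        rw [List.nil_append, ih (k + 1), List.map_map]
        apply List.map_congr_left
        intro x _
        simp only [Function.comp_apply]
        omega
  unfold pvBuckets
  rw [← List.foldl_map (f := fun p : String × Nat => (pvKeyOf p.1, p.2))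
        (g := fun (d : PySem.Dict (List Char) (List Nat)) (q : List Char × Nat) =>
          PySem.Dict.modify d q.1 [] (fun b => b ++ [q.2]))]
  rw [PySem.Dict.getD_foldl_modify_append]
  rw [PySem.Dict.getD_empty]
  simpa using auxz exps 0

lemma pvRem_mem {asg : List (Option String)} {b : Nat} (hb : b ∈ pvRem asg) :
    asg[b]? = some none ∧ b < asg.length := by
  simp only [pvRem, List.mem_filter, List.mem_range, decide_eq_true_eq] at hb
  exact ⟨hb.2, hb.1⟩

lemma pvRem_set {asg : List (Option String)} {b : Nat} (hb : b ∈ pvRem asg) (ac : String) :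
    pvRem (asg.set b (some ac)) = (pvRem asg).erase b := by
  obtain ⟨hb1, hb2⟩ := pvRem_mem hb
  have hnd : (pvRem asg).Nodup := List.Nodup.filter _ List.nodup_range
  rw [List.Nodup.erase_eq_filter hnd]
  unfold pvRem
  rw [List.filter_filter, List.length_set]
  apply List.filter_congr
  intro j hj
  rw [List.getElem?_set]
  by_cases hjb : j = b
  · subst hjb; rw [if_pos rfl, if_pos hb2]; simp
  · rw [if_neg (fun hh => hjb hh.symm)]
    simp [hjb]

lemma pvAcc_eq_max? (key : Nat → Int) (hk : ∀ j, 0 ≤ key j) (rem : List Nat) :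
    rem.foldl (fun st j => if st.1 < key j then (key j, (j : Int)) else st) (-1, -1)
      = match PySem.List.max? rem key with
        | none => ((-1 : Int), (-1 : Int))
        | some b => (key b, (b : Int)) := by
  have aux : ∀ (t : List Nat) (m : Nat), ∃ b : Nat,
      PySem.List.max? (m :: t) key = some b
      ∧ t.foldl (fun st j => if st.1 < key j then (key j, (j : Int)) else st) (key m, (m : Int))
          = (key b, (b : Int)) := by
    intro t
    induction t with
    | nil => intro m; exact ⟨m, by simp [PySem.List.max?], rfl⟩
    | cons r t ih =>
      intro m
      by_cases hcmp : key m < key r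
      · obtain ⟨b, h1, h2⟩ := ih r
        refine ⟨b, ?_, by simpa [hcmp] using h2⟩
        rw [← h1]; simp [PySem.List.max?, hcmp]
      · obtain ⟨b, h1, h2⟩ := ih m
        refine ⟨b, ?_, by simpa [hcmp] using h2⟩
        rw [← h1]; simp [PySem.List.max?, hcmp]
  cases rem with
  | nil => simp [PySem.List.max?]
  | cons r t =>
    obtain ⟨b, h1, h2⟩ := aux t r
    rw [h1]
    simp only [List.foldl_cons]
    rw [if_pos (show ((-1 : Int), (-1 : Int)).1 < key r by have := hk r; simp; omega)]
    exact h2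

lemma pvContains_add (used : PySem.Set String) (a ac : String) :
    PySem.Set.contains (PySem.Set.add used ac) a = true ↔ a = ac ∨ PySem.Set.contains used a = true := by
  simp [PySem.Set.contains, PySem.Set.mem_add]; tauto

lemma pvPhase1 (exps : List String) :
    ∀ (acr : List String), (∀ ac ∈ acr, ac ≠ "") →
    ∀ (bk : PySem.Dict (List Char) (List Nat)) (asg : List (Option String)) (used : PySem.Set String),
    asg.length = exps.length →
    (∀ c, bk.getD c [] = pvFree exps asg c) →
    (∀ a, (PySem.Set.contains used a = true) ↔ some a ∈ asg) →
    (acr.foldl pvStepB1 (bk, asg, used)).2.1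
        = acr.foldl (fun asg ac => pvScanA ac exps asg) asg
    ∧ (acr.foldl pvStepB1 (bk, asg, used)).2.1.length = exps.length
    ∧ (∀ a, (PySem.Set.contains (acr.foldl pvStepB1 (bk, asg, used)).2.2 a = true)
              ↔ some a ∈ (acr.foldl pvStepB1 (bk, asg, used)).2.1) := by
  intro acr
  induction acr with
  | nil => intro _ bk asg used hlen _ hused; exact ⟨rfl, hlen, hused⟩
  | cons ac acr ih =>
    intro hne bk asg used hlen hbk hused
    have hac : ac ≠ "" := hne ac List.mem_cons_self
    obtain ⟨c, t, hct⟩ : ∃ c t, ac.toList = c :: t := by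
      cases hl : ac.toList with
      | nil =>
        exfalso; apply hac
        have h2 := congrArg String.ofList hl
        simpa using h2
      | cons c t => exact ⟨c, t, rfl⟩
    have hne' : ∀ a ∈ acr, a ≠ "" := fun a ha => hne a (List.mem_cons_of_mem _ ha)
    have hscan := pvScanA_eq hct exps asg
    simp only [List.foldl_cons]
    cases hfree : pvFree exps asg (pvFirstLower ac) with
    | nil =>
      have hbcase : pvStepB1 (bk, asg, used) ac = (bk, asg, used) := by
        have hgd := hbk (pvFirstLower ac)
        rw [hfree] at hgd
        cases hget : bk.get? (pvFirstLower ac) with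
        | none => simp [pvStepB1, pvStepB1.get, hget]
        | some l =>
          have hl0 : l = [] := by
            rw [PySem.Dict.getD_eq_get?_getD, hget] at hgd; simpa using hgd
          subst hl0; simp [pvStepB1, pvStepB1.get, hget]
      have hAeq : pvScanA ac exps asg = asg := by rw [hscan, hfree]; rfl
      rw [hbcase, hAeq]
      exact ih hne' bk asg used hlen hbk hused
    | cons j rest =>
      have hget : bk.get? (pvFirstLower ac) = some (j :: rest) := by
        have hgd := hbk (pvFirstLower ac); rw [hfree] at hgd
        cases hget : bk.get? (pvFirstLower ac) with
        | none => rw [PySem.Dict.getD_eq_get?_getD, hget] at hgd; simp at hgd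
        | some l =>
          rw [PySem.Dict.getD_eq_get?_getD, hget] at hgd
          simp at hgd; rw [hgd]
      have hstep : pvStepB1 (bk, asg, used) ac
          = (bk.insert (pvFirstLower ac) rest, asg.set j (some ac), PySem.Set.add used ac) := by
        simp [pvStepB1, pvStepB1.get, hget]
      have hAeq : pvScanA ac exps asg = asg.set j (some ac) := by rw [hscan, hfree]; rfl
      rw [hstep, hAeq]
      have hjnone : asg[j]? = some none := pvFree_mem (hfree ▸ List.mem_cons_self)
      apply ih hne'
      · rw [List.length_set]; exact hlen
      · intro c'
        rw [PySem.Dict.getD_insert, pvFree_set_head hfree c']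
        by_cases hck : c' = pvFirstLower ac <;> simp [hck, hbk]
      · intro a
        rw [pvContains_add, pvMem_set_none hjnone]
        exact or_congr Iff.rfl (hused a)

lemma pvPhase2 (exps : List String) :
    ∀ (acr : List String) (asg : List (Option String)) (used : PySem.Set String) (rem : List Nat),
    asg.length = exps.length →
    (∀ a, (PySem.Set.contains used a = true) ↔ some a ∈ asg) →
    rem = pvRem asg →
    (acr.foldl (pvStepB2 exps) (asg, used, rem)).1 = acr.foldl (pvStepA2 exps) asg := by
  intro acr
  induction acr with
  | nil => intro asg used rem _ _ _; rfl
  | cons ac acr ih =>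
    intro asg used rem hlen hused hrem
    simp only [List.foldl_cons]
    by_cases hmem : some ac ∈ asg
    · have hcont : PySem.Set.contains used ac = true := (hused ac).mpr hmem
      have hB : pvStepB2 exps (asg, used, rem) ac = (asg, used, rem) := by
        simp only [pvStepB2]
        rw [if_neg (fun h => absurd h.1 (by rw [hcont]; simp))]
      have hA : pvStepA2 exps asg ac = asg := by simp [pvStepA2, hmem]
      rw [hB, hA]
      exact ih asg used rem hlen hused hrem
    · have hcont : PySem.Set.contains used ac = false := by
        rw [Bool.eq_false_iff]; exact fun h => hmem ((hused ac).mp h)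
      have hA : pvStepA2 exps asg ac
          = match PySem.List.max? (pvRem asg) (fun j : Nat =>
              pvMatches (PySem.Chars.lower ac.toList)
                        (PySem.Chars.lower ((exps[j]?.getD "").toList))) with
            | none => asg
            | some b => asg.set b (some ac) := by
        unfold pvStepA2
        rw [if_neg hmem]
        rw [PySem.List.foldl_ite_eq_foldl_filter (fun j : Nat => asg[j]? = some none)
            (fun (st : Int × Int) (j : Nat) =>
              if st.1 < pvMatches (PySem.Chars.lower ac.toList)
                  (PySem.Chars.lower ((exps[j]?.getD "").toList))
              then (pvMatches (PySem.Chars.lower ac.toList)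
                  (PySem.Chars.lower ((exps[j]?.getD "").toList)), (j : Int)) else st)]
        rw [show (List.range exps.length).filter (fun j => decide (asg[j]? = some none))
              = pvRem asg from by rw [pvRem, hlen]]
        rw [pvAcc_eq_max? (fun j : Nat =>
              pvMatches (PySem.Chars.lower ac.toList)
                        (PySem.Chars.lower ((exps[j]?.getD "").toList)))
            (fun j => pvMatches_nonneg _ _) (pvRem asg)]
        cases hmax : PySem.List.max? (pvRem asg) (fun j : Nat =>
              pvMatches (PySem.Chars.lower ac.toList)
                        (PySem.Chars.lower ((exps[j]?.getD "").toList))) with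
        | none => simp
        | some b => simp
      cases hmax : PySem.List.max? rem (fun j : Nat =>
            pvMatches (PySem.Chars.lower ac.toList)
                      (PySem.Chars.lower ((exps[j]?.getD "").toList))) with
      | none =>
        have hrne : rem = [] := (PySem.List.max?_eq_none_iff _ _).mp hmax
        have hB : pvStepB2 exps (asg, used, rem) ac = (asg, used, rem) := by
          simp only [pvStepB2]
          rw [if_neg (fun h => h.2 hrne)]
        rw [hB, hA, ← hrem, hmax]
        exact ih asg used rem hlen hused hrem
      | some b =>
        have hrne : rem ≠ [] := by
          intro h
          rw [h] at hmax
          simp [PySem.List.max?] at hmax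
        have hbmem : b ∈ rem := PySem.List.max?_mem hmax
        have hbrem : b ∈ pvRem asg := hrem ▸ hbmem
        have hbnone := (pvRem_mem hbrem).1
        have hB : pvStepB2 exps (asg, used, rem) ac
            = (asg.set b (some ac), PySem.Set.add used ac, rem.erase b) := by
          simp only [pvStepB2]
          rw [if_pos ⟨hcont, hrne⟩, hmax]
        rw [hB, hA, ← hrem, hmax]
        apply ih
        · rw [List.length_set]; exact hlen
        · intro a
          rw [pvContains_add, pvMem_set_none hbnone]
          exact or_congr Iff.rfl (hused a)
        · rw [hrem]; exact ((pvRem_set hbrem ac)).symm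

-- ===== VERDICT (by name: the statement is the Claim_ definition above) =====
theorem reorder_acronyms_spec : Claim_equal_reorder_acronyms := by
  intro xs _ hpre
  unfold Spec_reorder_acronyms reorder_acronyms reorder_acronyms_alt
  simp only []
  have hne : ∀ a ∈ xs.map Prod.fst, a ≠ "" := by
    intro a ha
    obtain ⟨p, hp, rfl⟩ := List.mem_map.mp ha
    exact hpre.2 p hp
  have hused0 : ∀ a, (PySem.Set.contains (PySem.Set.empty : PySem.Set String) a = true)
      ↔ some a ∈ List.replicate (xs.map Prod.snd).length (none : Option String) := by
    intro a
    simp [PySem.Set.contains, PySem.Set.empty, List.mem_replicate]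
  obtain ⟨h1, hlen1, hused1⟩ :=
    pvPhase1 (xs.map Prod.snd) (xs.map Prod.fst) hne (pvBuckets (xs.map Prod.snd))
      (List.replicate (xs.map Prod.snd).length none) PySem.Set.empty
      (by simp) (pvBuckets_spec (xs.map Prod.snd)) hused0
  have hrem : (List.range (xs.map Prod.snd).length).filter
        (fun j => decide ((((xs.map Prod.fst).foldl pvStepB1
          (pvBuckets (xs.map Prod.snd), List.replicate (xs.map Prod.snd).length none,
            PySem.Set.empty)).2.1)[j]? = some none))
      = pvRem ((xs.map Prod.fst).foldl pvStepB1
          (pvBuckets (xs.map Prod.snd), List.replicate (xs.map Prod.snd).length none,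
            PySem.Set.empty)).2.1 := by
    rw [pvRem, hlen1]
  have h2 := pvPhase2 (xs.map Prod.snd) (xs.map Prod.fst) _ _ _ hlen1 hused1 hrem
  rw [h2, h1]
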